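-- pv_equiv track=rewrite | github.com/HendrikF/rcon-client | client.py | peek_iter
-- ===== SOURCE A (Python) =====
-- import itertools
-- import collections
--
-- def peek_iter(iterable, n):
--     """ provides access to n following elements of an iterable
--
--         the last item will be followed by multiple None
--
--         for current, next1, next2 in peek_iter(iterable, 2): ...
--     """
--     iterator = itertools.chain(iterable, [None]*n)
--     queue = collections.deque(maxlen=n+1)
--     for i in range(n):
--         queue.append(next(iterator))
--     for item in iterator:
--         queue.append(item)
--         yield tuple(queue)
-- ===== SOURCE B (Python) =====
-- def peek_iter(iterable, n):
--     """ provides access to n following elements of an iterable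
--
--         the last item will be followed by multiple None
--     """
--     items = list(iterable)
--     padded = items + [None] * max(n, 0)
--     for j in range(len(items)):
--         yield tuple(padded[j:j + n + 1])
-- ===== Notes on version B (the rewrite author's own statement) =====
-- stated objective: simpler
-- what changed: B drops the deque and its two stateful loops entirely and yields each window directly as a closed-form slice padded[j:j+n+1] of the None-padded list; Pre_ excludes n <= -2, where A raises ValueError from the negative deque maxlen.
import Mathlib
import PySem

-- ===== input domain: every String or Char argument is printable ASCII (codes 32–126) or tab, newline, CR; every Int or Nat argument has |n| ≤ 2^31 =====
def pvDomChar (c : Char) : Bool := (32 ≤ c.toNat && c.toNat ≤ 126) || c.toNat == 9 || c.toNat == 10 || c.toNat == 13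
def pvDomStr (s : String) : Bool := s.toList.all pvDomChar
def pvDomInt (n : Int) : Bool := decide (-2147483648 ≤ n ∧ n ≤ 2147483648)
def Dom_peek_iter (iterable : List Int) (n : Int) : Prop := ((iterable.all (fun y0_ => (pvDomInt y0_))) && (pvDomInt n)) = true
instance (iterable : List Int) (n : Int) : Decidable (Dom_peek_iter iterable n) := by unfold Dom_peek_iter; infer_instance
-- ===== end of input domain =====

-- B replaces A's deque + two stateful loops by directly emitting each window as a slice of the padded list (simpler; same cost).
-- Pre_ excludes n ≤ -2, where A raises ValueError (deque maxlen = n+1 negative).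


-- ===== PORT A =====
-- deque.append with maxlen: push right, drop from the left when over maxlen
def pvDequeAppend (maxlen : Nat) (q : List (Option Int)) (x : Option Int) : List (Option Int) :=
  let q' := q ++ [x]
  if maxlen < q'.length then q'.drop (q'.length - maxlen) else q'

-- 'for item in iterator: queue.append(item); yield tuple(queue)'
def pvPeekLoop (maxlen : Nat) (q : List (Option Int)) : List (Option Int) → List (List (Option Int))
  | [] => []
  | x :: xs =>
    let q' := pvDequeAppend maxlen q x
    q' :: pvPeekLoop maxlen q' xs

def peek_iter (iterable : List Int) (n : Int) : List (List (Option Int)) :=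
  -- iterator = itertools.chain(iterable, [None]*n)
  let padded := iterable.map some ++ List.replicate n.toNat none
  let maxlen := (n + 1).toNat
  -- for i in range(n): queue.append(next(iterator))
  let queue := (padded.take n.toNat).foldl (pvDequeAppend maxlen) []
  pvPeekLoop maxlen queue (padded.drop n.toNat)

-- ===== PORT B =====
def peek_iter_alt (iterable : List Int) (n : Int) : List (List (Option Int)) :=
  let padded := iterable.map some ++ List.replicate (max n 0).toNat none
  (List.range iterable.length).map
    (fun (j : Nat) => PySem.List.slice padded (some (j : Int)) (some ((j : Int) + n + 1)))

-- ===== PRECONDITION & SPEC =====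
-- Pre_ excludes n ≤ -2, on which A raises ValueError (negative deque maxlen); A returns on every n ≥ -1.
def Pre_peek_iter (iterable : List Int) (n : Int) : Prop := -1 ≤ n
instance (iterable : List Int) (n : Int) : Decidable (Pre_peek_iter iterable n) := by unfold Pre_peek_iter; infer_instance
def pvWitness_peek_iter : List Int × Int := ([1, 2, 3], 2)

def Spec_peek_iter (iterable : List Int) (n : Int) (out : List (List (Option Int))) : Prop := out = peek_iter_alt iterable n
instance (iterable : List Int) (n : Int) (out : List (List (Option Int))) : Decidable (Spec_peek_iter iterable n out) := by unfold Spec_peek_iter; infer_instance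

-- ===== CLAIM (what is proved, stated in full; the proofs are below) =====
def Claim_equal_peek_iter : Prop := ∀ (iterable : List Int) (n : Int), Dom_peek_iter iterable n → Pre_peek_iter iterable n → Spec_peek_iter iterable n (peek_iter iterable n)

-- ===== LEMMAS AND PROOFS =====

-- maxlen 0: every append empties the queue
lemma pvPeekLoop_zero (xs : List (Option Int)) (q : List (Option Int)) :
    pvPeekLoop 0 q xs = xs.map (fun _ => []) := by
  induction xs generalizing q with
  | nil => rfl
  | cons x xs ih =>
    simp [pvPeekLoop, pvDequeAppend, ih]

-- no element is dropped while the queue stays within maxlen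
lemma pvFoldl_dequeAppend (maxlen : Nat) (ys : List (Option Int)) :
    ∀ q : List (Option Int), q.length + ys.length ≤ maxlen →
      ys.foldl (pvDequeAppend maxlen) q = q ++ ys := by
  induction ys with
  | nil => simp
  | cons y ys ih =>
    intro q h
    have h1 : ¬ maxlen < (q ++ [y]).length := by simp at h ⊢; omega
    simp only [List.foldl_cons, pvDequeAppend]
    rw [if_neg h1, ih (q ++ [y]) (by simp at h ⊢; omega)]
    simp

-- a full window: taking n+1 from q ++ xs with |q| = n+1 returns q
lemma pvTakeFull (q xs : List (Option Int)) (n : Nat) (h : q.length = n + 1) :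
    (q ++ xs).take (n + 1) = q := by
  rw [List.take_append_of_le_length (by omega), List.take_of_length_le (by omega)]

-- the main loop invariant: with queue length n or n+1, the loop emits the sliding windows
lemma pvPeekLoop_windows (n : Nat) :
    ∀ (xs q : List (Option Int)), n ≤ q.length → q.length ≤ n + 1 →
      pvPeekLoop (n + 1) q xs =
        (List.range xs.length).map
          (fun j => ((q ++ xs).drop (j + (q.length - n))).take (n + 1)) := by
  intro xs
  induction xs with
  | nil => simp [pvPeekLoop]
  | cons x xs ih =>
    intro q hlo hhi
    have hq : q.length = n ∨ q.length = n + 1 := by omega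
    rcases hq with hq | hq
    · -- first real item: queue grows to n+1, no drop
      have h1 : ¬ (n + 1) < (q ++ [x]).length := by simp [hq]
      simp only [pvPeekLoop, pvDequeAppend]
      rw [if_neg h1, ih (q ++ [x]) (by simp; omega) (by simp [hq])]
      simp only [List.length_cons, List.range_succ_eq_map, List.map_cons, List.map_map]
      refine List.cons_eq_cons.mpr ⟨?_, ?_⟩
      · rw [show (0 + (q.length - n)) = 0 by omega, List.drop_zero,
            show q ++ x :: xs = (q ++ [x]) ++ xs by simp,
            pvTakeFull (q ++ [x]) xs n (by simp [hq])]
      · apply List.map_congr_left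
        intro j _
        simp only [Function.comp]
        have e1 : (q ++ [x] ++ xs) = (q ++ x :: xs) := by simp
        rw [e1]
        congr 1
        simp [hq]
    · -- steady state: drop one from the left
      have h1 : (n + 1) < (q ++ [x]).length := by simp [hq]
      have hd : (q ++ [x]).length - (n + 1) = 1 := by simp [hq]
      simp only [pvPeekLoop, pvDequeAppend]
      rw [if_pos h1, hd]
      set q' := (q ++ [x]).drop 1 with hq'
      have hql : q'.length = n + 1 := by simp [hq', hq]
      rw [ih q' (by omega) (by omega)]
      have e2 : q' ++ xs = (q ++ x :: xs).drop 1 := by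
        simp [hq', List.drop_append_of_le_length (by omega : 1 ≤ q.length)]
      simp only [List.length_cons, List.range_succ_eq_map, List.map_cons, List.map_map]
      refine List.cons_eq_cons.mpr ⟨?_, ?_⟩
      · -- head window
        rw [show (0 + (q.length - n)) = 1 by omega, ← e2, pvTakeFull q' xs n hql]
      · apply List.map_congr_left
        intro j _
        simp only [Function.comp]
        rw [hql, e2, List.drop_drop]
        congr 2
        omega

-- the padding replicate count coincides in the two ports
lemma pvPad_eq (n : Int) : (max n 0).toNat = n.toNat := by omega

-- the whole equivalence, stated on the zeta-reduced bodies of the two ports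
lemma peek_core (iterable : List Int) (n : Int) (hpre : -1 ≤ n) :
    pvPeekLoop (n + 1).toNat
        (((iterable.map some ++ List.replicate n.toNat none).take n.toNat).foldl
          (pvDequeAppend (n + 1).toNat) [])
        ((iterable.map some ++ List.replicate n.toNat none).drop n.toNat) =
      (List.range iterable.length).map
        (fun (j : Nat) => PySem.List.slice (iterable.map some ++ List.replicate (max n 0).toNat none)
          (some (j : Int)) (some ((j : Int) + n + 1))) := by
  rw [pvPad_eq]
  set padded := iterable.map some ++ List.replicate n.toNat none with hpadded
  have hplen : padded.length = iterable.length + n.toNat := by simp [hpadded]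
  by_cases hneg : n = -1
  · -- n = -1: maxlen 0, every window is empty on both sides
    subst hneg
    have ht0 : ((-1 : Int)).toNat = 0 := rfl
    have ht1 : ((-1 : Int) + 1).toNat = 0 := rfl
    rw [ht1]
    conv_lhs => rw [ht0]
    rw [List.take_zero, List.foldl_nil, List.drop_zero, pvPeekLoop_zero]
    have hlen' : padded.length = iterable.length := by rw [hplen, ht0]; simp
    have hL : padded.map (fun _ => ([] : List (Option Int)))
        = (List.range iterable.length).map (fun _ => ([] : List (Option Int))) := by
      apply List.ext_getElem <;> simp [hlen']
    rw [hL]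
    apply List.map_congr_left
    intro j _
    rw [show ((j : Int) + (-1) + 1) = ((j : Int) + ((0 : Nat) : Int)) by push_cast; ring,
        PySem.List.slice_natCast_add]
    simp
  · -- n ≥ 0
    obtain ⟨m, hm⟩ : ∃ m : Nat, n = (m : Int) := ⟨n.toNat, by omega⟩
    subst hm
    have htn : ((m : Int)).toNat = m := by omega
    have hml : ((m : Int) + 1).toNat = m + 1 := by omega
    rw [htn, hml]
    have hpre1 : (padded.take m).foldl (pvDequeAppend (m + 1)) [] = padded.take m := by
      rw [pvFoldl_dequeAppend (m + 1) (padded.take m) []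
            (by simp only [List.length_nil, List.length_take]; omega)]
      simp
    have hqlen : (padded.take m).length = m := by
      rw [List.length_take]
      omega
    rw [hpre1, pvPeekLoop_windows m (padded.drop m) (padded.take m) (by omega) (by omega),
        List.take_append_drop, hqlen, Nat.sub_self]
    have hxlen : (padded.drop m).length = iterable.length := by
      rw [List.length_drop]; omega
    rw [hxlen]
    apply List.map_congr_left
    intro j _
    rw [show ((j : Int) + (m : Int) + 1) = ((j : Int) + ((m + 1 : Nat) : Int)) by push_cast; ring,
        PySem.List.slice_natCast_add]
    simp

-- ===== VERDICT (by name: the statement is the Claim_ definition above) =====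
theorem peek_iter_spec : Claim_equal_peek_iter := by
  intro iterable n _ hpre
  exact peek_core iterable n hpre
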